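-- pv_equiv track=rewrite | github.com/pypi-data/pypi-mirror-369 | packages/rstbuddy/rstbuddy-0.3.1.tar.gz/rstbuddy-0.3.1/rstbuddy/services/pandoc_converter.py | _fix_code_blocks
-- ===== SOURCE A (Python) =====
-- def _fix_code_blocks(content: str) -> str:
--     """
--     Fix malformed code blocks.
--
--     Args:
--         content: The content to process
--
--     Returns:
--         Content with fixed code blocks
--
--     """
--     # Ensure code blocks are properly closed
--     lines = content.split("\n")
--     fixed_lines = []
--     in_code_block = False
--
--     for line in lines:
--         if line.startswith("```"):
--             if in_code_block:  # noqa: SIM108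
--                 # Close the code block
--                 in_code_block = False
--             else:
--                 # Open a new code block
--                 in_code_block = True
--             fixed_lines.append(line)
--         else:
--             fixed_lines.append(line)
--
--     # If we're still in a code block at the end, close it
--     if in_code_block:
--         fixed_lines.append("```")
--
--     return "\n".join(fixed_lines)
-- ===== SOURCE B (Python) =====
-- def _fix_code_blocks(content: str) -> str:
--     """Append one closing fence iff the number of fence lines is odd.
--
--     A fence line starts with three backticks at position 0 or right after a newline,
--     so the fence-line count is a non-overlapping substring count (no line splitting)
--     plus one for a fence at the very start.
--     """
--     fences = content.count("\n```") + content.startswith("```")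
--     if fences % 2:
--         return content + "\n```"
--     return content
-- ===== Notes on version B (the rewrite author's own statement) =====
-- stated objective: alternative
-- what changed: B never splits the content into lines: it counts non-overlapping occurrences of a newline immediately followed by a triple-backtick fence via str.count, adds one if the content itself begins with a fence, and conditionally concatenates a single closing fence, instead of A's stateful line-by-line toggle loop that rebuilds and rejoins the line list.
import Mathlib
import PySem

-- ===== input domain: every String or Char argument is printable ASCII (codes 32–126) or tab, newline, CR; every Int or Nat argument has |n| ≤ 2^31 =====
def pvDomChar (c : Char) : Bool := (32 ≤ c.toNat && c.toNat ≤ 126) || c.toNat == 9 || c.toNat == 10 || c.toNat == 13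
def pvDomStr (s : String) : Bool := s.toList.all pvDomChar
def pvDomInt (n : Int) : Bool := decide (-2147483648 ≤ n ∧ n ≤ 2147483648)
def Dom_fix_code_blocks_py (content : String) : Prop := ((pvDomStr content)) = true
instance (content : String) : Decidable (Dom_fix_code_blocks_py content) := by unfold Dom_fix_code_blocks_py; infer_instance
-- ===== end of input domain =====

-- B never splits the content into lines: it counts non-overlapping occurrences of the
-- substring 'newline + three backticks' (plus a fence at position 0) and conditionally
-- appends one closing fence (objective: alternative — substring search, no line loop).

-- ===== PORT A =====
-- lines = content.split("\n"); the separator is the nonempty literal "\n", so Python's split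
-- is exactly PySem.Chars.splitOn.
def fix_code_blocks_py (content : String) : String :=
  let lines : List String := (PySem.Chars.splitOn content.toList ['\n']).map String.ofList
  -- the for-loop: state = (fixed_lines, in_code_block)
  let st : List String × Bool :=
    lines.foldl (fun st line =>
      if PySem.Str.startswith line "```" then
        if st.2 then (st.1 ++ [line], false) else (st.1 ++ [line], true)
      else (st.1 ++ [line], st.2)) ([], false)
  let fixed_lines : List String := if st.2 then st.1 ++ ["```"] else st.1
  PySem.Str.join "\n" fixed_lines

-- ===== PORT B =====
-- fences = content.count("\n```") + content.startswith("```"); Python's bool adds as 0/1.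
-- 'content + "\n```"' is string concatenation, ported exactly on the code-point lists.
def fix_code_blocks_py_alt (content : String) : String :=
  let fences : Nat :=
    PySem.Str.count content "\n```" +
      (if PySem.Str.startswith content "```" then 1 else 0)
  if fences % 2 == 1 then String.ofList (content.toList ++ ['\n', '`', '`', '`']) else content

-- ===== PRECONDITION & SPEC =====
def Spec_fix_code_blocks_py (content : String) (out : String) : Prop := out = fix_code_blocks_py_alt content
instance (content : String) (out : String) : Decidable (Spec_fix_code_blocks_py content out) := by unfold Spec_fix_code_blocks_py; infer_instance

-- ===== CLAIM =====
def Claim_equal_fix_code_blocks_py : Prop := ∀ (content : String), Dom_fix_code_blocks_py content → Spec_fix_code_blocks_py content (fix_code_blocks_py content)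

-- ===== LEMMAS AND PROOFS =====
mutual
def skipLN : List Char → Nat
  | [] => 0
  | '\n' :: t => scanH '`' ['`', '`'] t
  | _ :: t => skipLN t
def scanH : Char → List Char → List Char → Nat
  | _, _, [] => 0
  | _, _, ('\n' :: t) => scanH '`' ['`', '`'] t
  | n, ns, (c :: t) =>
      if c = n then
        match ns with
        | [] => 1 + skipLN t
        | m :: ms => scanH m ms t
      else skipLN t
end

theorem scanH_nil (n : Char) (ns : List Char) : scanH n ns [] = 0 := by rw [scanH]
theorem scanH_nl (n : Char) (ns t : List Char) : scanH n ns ('\n'::t) = scanH '`' ['`','`'] t := by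
  rw [scanH]
theorem scanH_hit_done (n : Char) (c : Char) (t : List Char) (hc : c ≠ '\n') (h : c = n) :
    scanH n [] (c::t) = 1 + skipLN t := by rw [scanH] <;> simp_all
theorem scanH_hit_more (n m : Char) (ms : List Char) (c : Char) (t : List Char)
    (hc : c ≠ '\n') (h : c = n) : scanH n (m::ms) (c::t) = scanH m ms t := by
  rw [scanH] <;> simp_all
theorem scanH_miss (n : Char) (ns : List Char) (c : Char) (t : List Char)
    (hc : c ≠ '\n') (h : c ≠ n) : scanH n ns (c::t) = skipLN t := by
  rw [scanH.eq_def]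
  simp_all
theorem skipLN_nil : skipLN [] = 0 := by rw [skipLN]
theorem skipLN_nl (t : List Char) : skipLN ('\n'::t) = scanH '`' ['`','`'] t := by rw [skipLN]
theorem skipLN_cons (c : Char) (t : List Char) (hc : c ≠ '\n') : skipLN (c::t) = skipLN t := by
  rw [skipLN] <;> simp_all

def cntNB : List Char → Nat
  | '\n' :: '`' :: '`' :: '`' :: r => cntNB r + 1
  | _ :: t => cntNB t
  | [] => 0

theorem cntNB_cons_nl (t : List Char) :
    cntNB ('\n' :: t) = (if ['`','`','`'].isPrefixOf t then 1 else 0) + cntNB t := by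
  rcases t with _ | ⟨a, _ | ⟨b, _ | ⟨c, r⟩⟩⟩
  · simp [cntNB, List.isPrefixOf]
  · by_cases ha : a = '`' <;> simp_all [cntNB, List.isPrefixOf]
  · by_cases ha : a = '`' <;> by_cases hb : b = '`' <;> simp_all [cntNB, List.isPrefixOf]
  · by_cases ha : a = '`' <;> by_cases hb : b = '`' <;> by_cases hc : c = '`' <;>
      subst_vars <;> simp_all [cntNB, List.isPrefixOf] <;>
      first | omega | (intros; simp_all [eq_comm])

theorem cntNB_cons_ne (c : Char) (t : List Char) (h : c ≠ '\n') :
    cntNB (c :: t) = cntNB t := by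
  rcases t with _ | ⟨a, _ | ⟨b, _ | ⟨d, r⟩⟩⟩ <;> simp [cntNB, h]

theorem scan_eq_cnt (n : Nat) : ∀ (s : List Char), s.length ≤ n →
    skipLN s = cntNB s ∧
    scanH '`' ['`', '`'] s = (if ['`','`','`'].isPrefixOf s then 1 else 0) + cntNB s := by
  induction n with
  | zero =>
    intro s h
    have hs : s = [] := List.length_eq_zero_iff.mp (Nat.le_zero.mp h)
    subst hs
    simp [skipLN_nil, scanH_nil, cntNB, List.isPrefixOf]
  | succ n ih =>
    intro s h
    constructor
    · -- skipLN s = cntNB s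
      rcases s with _ | ⟨c, t⟩
      · simp [skipLN_nil, cntNB]
      · by_cases hc : c = '\n'
        · subst hc
          rw [skipLN_nl, cntNB_cons_nl]
          exact (ih t (by simpa using h)).2
        · rw [skipLN_cons c t hc, cntNB_cons_ne c t hc]
          exact (ih t (by simp at h; omega)).1
    · -- scanH fff s = fI s + cntNB s
      rcases s with _ | ⟨c, t⟩
      · simp [scanH_nil, cntNB, List.isPrefixOf]
      · by_cases hc : c = '\n'
        · subst hc
          rw [scanH_nl, cntNB_cons_nl]
          have := (ih t (by simpa using h)).2
          rw [this]
          simp [List.isPrefixOf]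
        · by_cases hg : c = '`'
          · subst hg
            rw [scanH_hit_more '`' '`' ['`'] '`' t hc rfl]
            have ht : t.length ≤ n := by simp at h; omega
            rcases t with _ | ⟨b, u⟩
            · simp [scanH_nil, cntNB, List.isPrefixOf]
            · by_cases hb : b = '\n'
              · subst hb
                rw [scanH_nl]
                have := (ih u (by simp at ht; omega)).2
                rw [this, cntNB_cons_ne '`' _ (by decide), cntNB_cons_nl]
                simp [List.isPrefixOf]
              · by_cases hb2 : b = '`'
                · subst hb2
                  rw [scanH_hit_more '`' '`' [] '`' u hb rfl]
                  have hu : u.length ≤ n := by simp at ht; omega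
                  rcases u with _ | ⟨d, v⟩
                  · simp [scanH_nil, cntNB, List.isPrefixOf]
                  · have hv : v.length ≤ n := by simp at hu; omega
                    by_cases hd : d = '\n'
                    · subst hd
                      rw [scanH_nl]
                      have := (ih v hv).2
                      rw [this, cntNB_cons_ne '`' _ (by decide),
                          cntNB_cons_ne '`' _ (by decide), cntNB_cons_nl]
                      simp [List.isPrefixOf]
                    · by_cases hd2 : d = '`'
                      · subst hd2
                        rw [scanH_hit_done '`' '`' v hd rfl]
                        have := (ih v hv).1
                        rw [this, cntNB_cons_ne '`' _ (by decide),
                            cntNB_cons_ne '`' _ (by decide), cntNB_cons_ne '`' _ (by decide)]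
                        simp [List.isPrefixOf]
                      · rw [scanH_miss '`' [] d v hd hd2]
                        have := (ih v hv).1
                        rw [this, cntNB_cons_ne '`' _ (by decide),
                            cntNB_cons_ne '`' _ (by decide), cntNB_cons_ne d _ hd]
                        have hd2' : ¬('`' = d) := fun hh => hd2 hh.symm
                        simp [List.isPrefixOf, hd2']
                · rw [scanH_miss '`' ['`'] b u hb hb2]
                  have hu : u.length ≤ n := by simp at ht; omega
                  have := (ih u hu).1
                  rw [this, cntNB_cons_ne '`' _ (by decide), cntNB_cons_ne b _ hb]
                  have hb2' : ¬('`' = b) := fun hh => hb2 hh.symm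
                  simp [List.isPrefixOf, hb2']
          · rw [scanH_miss '`' ['`','`'] c t hc hg]
            have ht : t.length ≤ n := by simp at h; omega
            have := (ih t ht).1
            rw [this, cntNB_cons_ne c t hc]
            have hg' : ¬('`' = c) := fun hh => hg hh.symm
            simp [List.isPrefixOf, hg']

theorem go_acc (sep : List Char) (fuel : Nat) :
    ∀ (l cur : List Char) (acc : List (List Char)),
      PySem.Chars.splitOn.go sep fuel l cur acc =
        acc.reverse ++ PySem.Chars.splitOn.go sep fuel l cur [] := by
  induction fuel with
  | zero =>
    intro l cur acc
    cases l <;> rw [PySem.Chars.splitOn.go, PySem.Chars.splitOn.go] <;> simp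
  | succ fuel ih =>
    intro l cur acc
    cases l with
    | nil => rw [PySem.Chars.splitOn.go, PySem.Chars.splitOn.go] <;> simp
    | cons c rest =>
      rw [PySem.Chars.splitOn.go, PySem.Chars.splitOn.go]
      by_cases h : sep.isPrefixOf (c :: rest) <;>
        simp only [h, if_true, Bool.false_eq_true, if_false]
      · rw [ih _ _ (cur.reverse :: acc), ih _ _ [cur.reverse]]
        simp
      · exact ih _ _ acc

def stClass (cs : List Char) (s : List Char) : Nat :=
  if ['`', '`', '`'].isPrefixOf cs then 1 + skipLN s
  else if cs = [] then scanH '`' ['`', '`'] s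
  else if cs = ['`'] then scanH '`' ['`'] s
  else if cs = ['`', '`'] then scanH '`' [] s
  else skipLN s

-- prefixes of "```" are exactly the four initial segments
theorem prefix_fff (cs : List Char) (h : cs <+: ['`','`','`']) :
    cs = [] ∨ cs = ['`'] ∨ cs = ['`','`'] ∨ cs = ['`','`','`'] := by
  rcases cs with _ | ⟨a, _ | ⟨b, _ | ⟨c, r⟩⟩⟩
  · exact Or.inl rfl
  · obtain ⟨u, hu⟩ := h; injection hu with h1 h2; subst h1; simp
  · obtain ⟨u, hu⟩ := h
    injection hu with h1 h2; subst h1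
    injection h2 with h1 h2; subst h1; simp
  · obtain ⟨u, hu⟩ := h
    injection hu with h1 h2; subst h1
    injection h2 with h1 h2; subst h1
    injection h2 with h1 h2; subst h1
    simp_all

theorem stClass_step (cs : List Char) (c : Char) (t : List Char) (hc : c ≠ '\n') :
    stClass cs (c :: t) = stClass (cs ++ [c]) t := by
  unfold stClass
  by_cases hf : (['`','`','`'] : List Char).isPrefixOf cs
  · have hf2 : (['`','`','`'] : List Char).isPrefixOf (cs ++ [c]) = true := by
      have := List.isPrefixOf_iff_prefix.mp hf
      exact List.isPrefixOf_iff_prefix.mpr (this.trans (List.prefix_append _ _))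
    simp only [hf, hf2, if_true]
    rw [skipLN_cons c t hc]
  · have hg' : c ≠ '`' → ¬ ('`' = c) := fun hg hh => hg hh.symm
    by_cases h0 : cs = []
    · subst h0
      by_cases hg : c = '`'
      · subst hg
        simp only [List.nil_append]
        norm_num [List.isPrefixOf]
        rw [scanH_hit_more '`' '`' ['`'] '`' t hc rfl]
      · simp only [List.nil_append]
        rw [scanH_miss '`' ['`','`'] c t hc hg]
        simp [List.isPrefixOf, hg, Ne.symm hg]
    · by_cases h1 : cs = ['`']
      · subst h1
        by_cases hg : c = '`'
        · subst hg
          norm_num [List.isPrefixOf]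
          rw [scanH_hit_more '`' '`' [] '`' t hc rfl]
          simp
        · rw [scanH_miss '`' ['`'] c t hc hg]
          simp [List.isPrefixOf, hg, Ne.symm hg, hf]
      · by_cases h2 : cs = ['`','`']
        · subst h2
          by_cases hg : c = '`'
          · subst hg
            norm_num [List.isPrefixOf]
            simp [scanH_hit_done '`' '`' t hc rfl]
          · rw [scanH_miss '`' [] c t hc hg]
            simp [List.isPrefixOf, hg, Ne.symm hg, hf]
        · -- dead state stays dead
          have hf2 : ¬ (['`','`','`'] : List Char).isPrefixOf (cs ++ [c]) = true := by
            intro hpf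
            have hpf' := List.isPrefixOf_iff_prefix.mp hpf
            have hcs : cs <+: cs ++ [c] := List.prefix_append _ _
            rcases (List.prefix_or_prefix_of_prefix hcs hpf') with hle | hge
            · rcases prefix_fff cs hle with h | h | h | h
              · exact h0 h
              · exact h1 h
              · exact h2 h
              · exact hf (by rw [h]; simp [List.isPrefixOf])
            · exact hf (List.isPrefixOf_iff_prefix.mpr hge)
          have hb : cs ++ [c] ≠ [] := by simp
          have hcc : cs ++ [c] ≠ ['`'] := by
            intro hh
            have hlen := congrArg List.length hh
            simp at hlen
            exact h0 hlen
          have hdd : cs ++ [c] ≠ ['`','`'] := by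
            intro hh
            rcases cs with _ | ⟨a, _ | ⟨b, r⟩⟩
            · exact h0 rfl
            · simp at hh
              exact h1 (by simp [hh.1])
            · have hlen := congrArg List.length hh
              simp at hlen
          simp only [hf, hf2, h0, h1, h2, hb, hcc, hdd, if_false, Bool.false_eq_true, reduceIte]
          rw [skipLN_cons c t hc]

theorem go_countP (fuel : Nat) :
    ∀ (s cur : List Char), s.length ≤ fuel →
      (PySem.Chars.splitOn.go ['\n'] fuel s cur []).countP
        (fun l => ['`', '`', '`'].isPrefixOf l) = stClass cur.reverse s := by
  induction fuel with
  | zero =>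
    intro s cur h
    have hs : s = [] := List.length_eq_zero_iff.mp (Nat.le_zero.mp h)
    subst hs
    rw [PySem.Chars.splitOn.go]
    unfold stClass
    simp only [List.append_nil, List.reverse_cons, List.reverse_nil, List.nil_append,
      List.countP_cons, List.countP_nil, skipLN_nil, scanH_nil]
    split_ifs with hA hB hC hD <;> simp_all [List.isPrefixOf]
  | succ fuel ih =>
    intro s cur h
    cases s with
    | nil =>
      rw [PySem.Chars.splitOn.go]
      case x_5 => omega
      unfold stClass
      simp only [List.reverse_cons, List.reverse_nil, List.nil_append,
        List.countP_cons, List.countP_nil, skipLN_nil, scanH_nil]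
      split_ifs with hA hB hC hD <;> simp_all [List.isPrefixOf]
    | cons c rest =>
      rw [PySem.Chars.splitOn.go]
      by_cases hsep : (['\n'] : List Char).isPrefixOf (c :: rest)
      · have hc : c = '\n' := by
          have h' := hsep
          simp [List.isPrefixOf] at h'
          exact h'.symm
        subst hc
        simp only [hsep, if_true]
        rw [go_acc]
        rw [List.countP_append]
        have hrest : rest.length ≤ fuel := by simp at h; omega
        rw [show List.drop (['\n'] : List Char).length ('\n' :: rest) = rest by simp]
        rw [ih rest [] hrest]
        unfold stClass
        simp only [List.reverse_nil, List.countP_cons, List.countP_nil, skipLN_nl]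
        split_ifs with hA hB hC hD <;>
          simp_all [List.isPrefixOf, skipLN_nl, scanH_nl]
      · have hc : c ≠ '\n' := by
          intro hh; exact hsep (by simp [hh, List.isPrefixOf])
        simp only [hsep, Bool.false_eq_true, if_false]
        have hrest : rest.length ≤ fuel := by simp at h; omega
        rw [ih rest (c :: cur) hrest]
        rw [show (c :: cur).reverse = cur.reverse ++ [c] by simp]
        exact (stClass_step cur.reverse c rest hc).symm

-- splitOn.go never returns the empty list of pieces
theorem go_ne_nil (sep : List Char) (fuel : Nat) :
    ∀ (l cur : List Char) (acc : List (List Char)),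
      PySem.Chars.splitOn.go sep fuel l cur acc ≠ [] := by
  induction fuel with
  | zero => intro l cur acc; cases l <;> rw [PySem.Chars.splitOn.go] <;> simp
  | succ fuel ih =>
    intro l cur acc
    cases l with
    | nil => rw [PySem.Chars.splitOn.go] <;> simp
    | cons c rest =>
      rw [PySem.Chars.splitOn.go]
      by_cases h : sep.isPrefixOf (c :: rest) <;>
        simp only [h, if_true, Bool.false_eq_true, if_false] <;> apply ih

-- joining the pieces of splitOn.go with the separator restores the input
theorem go_join (sep : List Char) (fuel : Nat) :
    ∀ (l cur : List Char),
      PySem.Chars.join sep (PySem.Chars.splitOn.go sep fuel l cur []) = cur.reverse ++ l := by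
  induction fuel with
  | zero =>
    intro l cur
    cases l <;> rw [PySem.Chars.splitOn.go] <;>
      simp [PySem.Chars.join_singleton]
  | succ fuel ih =>
    intro l cur
    cases l with
    | nil => rw [PySem.Chars.splitOn.go] <;> simp [PySem.Chars.join_singleton]
    | cons c rest =>
      rw [PySem.Chars.splitOn.go]
      by_cases h : sep.isPrefixOf (c :: rest) <;>
        simp only [h, if_true, Bool.false_eq_true, if_false]
      · rw [go_acc]
        have hpre : sep ++ List.drop sep.length (c :: rest) = c :: rest := by
          obtain ⟨t, ht⟩ := List.isPrefixOf_iff_prefix.mp h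
          rw [← ht, List.drop_left]
        rcases hgo : PySem.Chars.splitOn.go sep fuel (List.drop sep.length (c :: rest)) [] []
          with _ | ⟨p, ps⟩
        · exact absurd hgo (go_ne_nil sep fuel _ _ _)
        · have hjoin := ih (List.drop sep.length (c :: rest)) []
          rw [hgo] at hjoin
          simp only [List.reverse_nil, List.nil_append] at hjoin
          conv_rhs => rw [← hpre]
          simp [PySem.Chars.join_cons_cons, hjoin]
      · rw [ih rest (c :: cur)]; simp

theorem join_splitOn (sep : List Char) (s : List Char) :
    PySem.Chars.join sep (PySem.Chars.splitOn s sep) = s := by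
  unfold PySem.Chars.splitOn
  simpa using go_join sep (s.length + 1) s []

-- joining xs ++ [y] appends sep ++ y after joining xs (for nonempty xs)
theorem join_append_singleton (sep y : List Char) :
    ∀ (xs : List (List Char)), xs ≠ [] →
      PySem.Chars.join sep (xs ++ [y]) = PySem.Chars.join sep xs ++ sep ++ y := by
  intro xs
  induction xs with
  | nil => intro h; exact absurd rfl h
  | cons p ps ih =>
    intro _
    cases ps with
    | nil => simp [PySem.Chars.join_cons_cons, PySem.Chars.join_singleton]
    | cons q qs =>
      have := ih (by simp)
      simp only [List.cons_append, PySem.Chars.join_cons_cons] at *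
      rw [this]; simp

-- A's loop copies every line and ends with the parity of the fence-line count
theorem foldl_toggle (p : String → Bool) :
    ∀ (ls : List String) (acc : List String) (b : Bool),
      ls.foldl (fun st line =>
        if p line then
          if st.2 then (st.1 ++ [line], false) else (st.1 ++ [line], true)
        else (st.1 ++ [line], st.2)) (acc, b) =
      (acc ++ ls, xor b (ls.countP p % 2 == 1)) := by
  intro ls
  induction ls with
  | nil => intro acc b; simp
  | cons a ls ih =>
    intro acc b
    simp only [List.foldl_cons, List.countP_cons]
    by_cases hp : p a <;> simp only [hp, if_true, Bool.false_eq_true, if_false]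
    · cases b <;> simp [ih, Nat.add_mod, xor] <;>
        rcases Nat.mod_two_eq_zero_or_one (ls.countP p) with h | h <;> simp [h]
    · simp [ih]

theorem count_go_eq (fuel : Nat) :
    ∀ (s : List Char) (acc : Nat), s.length ≤ fuel →
      PySem.Chars.count.go ['\n','`','`','`'] fuel s acc = acc + cntNB s := by
  induction fuel with
  | zero =>
    intro s acc h
    have hs : s = [] := List.length_eq_zero_iff.mp (Nat.le_zero.mp h)
    subst hs
    rw [PySem.Chars.count.go]; simp [cntNB]
  | succ fuel ih =>
    intro s acc h
    cases s with
    | nil =>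
      rw [PySem.Chars.count.go] <;> first | simp [cntNB] | omega
    | cons c t =>
      rw [PySem.Chars.count.go]
      by_cases hp : (['\n','`','`','`'] : List Char).isPrefixOf (c :: t)
      · simp only [hp, if_true]
        obtain ⟨r, hr⟩ := List.isPrefixOf_iff_prefix.mp hp
        simp only [List.cons_append] at hr
        injection hr with h1 h2
        subst h1
        simp only [List.nil_append] at h2
        subst h2
        have hlen : r.length ≤ fuel := by simp at h; omega
        rw [show List.drop (['\n','`','`','`'] : List Char).length
            ('\n' :: '`' :: '`' :: '`' :: r) = r by simp]
        rw [ih r (acc + 1) hlen]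
        simp [cntNB]; omega
      · simp only [hp, Bool.false_eq_true, if_false]
        have hlen : t.length ≤ fuel := by simp at h; omega
        rw [ih t acc hlen]
        by_cases hc : c = '\n'
        · subst hc
          rw [cntNB_cons_nl]
          have : ¬ (['`','`','`'] : List Char).isPrefixOf t := by
            intro hpf
            exact hp (by simpa [List.isPrefixOf] using hpf)
          simp [this]
        · rw [cntNB_cons_ne c t hc]

theorem count_eq_cntNB (s : List Char) :
    PySem.Chars.count s ['\n', '`', '`', '`'] = cntNB s := by
  rw [PySem.Chars.count]
  simpa using count_go_eq s.length s 0 le_rfl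

-- A's fence-line count equals B's "\n```"-substring count plus the position-0 fence
theorem countP_eq_count (s : List Char) :
    (PySem.Chars.splitOn s ['\n']).countP (fun l => ['`', '`', '`'].isPrefixOf l) =
      (if ['`','`','`'].isPrefixOf s then 1 else 0) +
        PySem.Chars.count s ['\n', '`', '`', '`'] := by
  unfold PySem.Chars.splitOn
  rw [go_countP (s.length + 1) s [] (by omega)]
  have h := (scan_eq_cnt s.length s le_rfl).2
  unfold stClass
  simp only [List.reverse_nil]
  rw [if_neg (by simp [List.isPrefixOf])]
  simp only [if_true]
  rw [h, count_eq_cntNB]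

-- ===== VERDICT (by name: the statement is the Claim_ definition above) =====
theorem fix_code_blocks_py_spec : Claim_equal_fix_code_blocks_py := by
  intro content _
  unfold Spec_fix_code_blocks_py fix_code_blocks_py fix_code_blocks_py_alt
  set parts := PySem.Chars.splitOn content.toList ['\n'] with hparts
  have hne : parts ≠ [] := by rw [hparts]; unfold PySem.Chars.splitOn; exact go_ne_nil _ _ _ _ _
  have hjoin : PySem.Chars.join ['\n'] parts = content.toList := by
    rw [hparts]; exact join_splitOn ['\n'] content.toList
  have hmap : (parts.map String.ofList).map String.toList = parts := by
    simp [List.map_map, Function.comp_def]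
  dsimp only
  rw [foldl_toggle]
  simp only [Bool.false_xor, List.nil_append]
  -- identify the two counts
  have hcnt : (parts.map String.ofList).countP
      (fun line => PySem.Str.startswith line "```") =
      PySem.Str.count content "\n```" +
        (if PySem.Str.startswith content "```" then 1 else 0) := by
    rw [List.countP_map]
    have hpred : ((fun line => PySem.Str.startswith line "```") ∘ String.ofList) =
        (fun l => (['`', '`', '`'] : List Char).isPrefixOf l) := by
      funext l
      simp [Function.comp, PySem.Str.startswith, PySem.Chars.startswith,
        String.toList_ofList]
    rw [hpred, hparts, countP_eq_count]
    have h1 : PySem.Str.count content "\n```" =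
        PySem.Chars.count content.toList ['\n','`','`','`'] := rfl
    have h2 : PySem.Str.startswith content "```" =
        (['`','`','`'] : List Char).isPrefixOf content.toList := rfl
    rw [h1, h2]
    omega
  rw [hcnt]
  by_cases hodd : ((PySem.Str.count content "\n```" +
      (if PySem.Str.startswith content "```" then 1 else 0)) % 2 == 1)
  · simp only [hodd, if_true]
    unfold PySem.Str.join
    congr 1
    rw [List.map_append, hmap]
    show PySem.Chars.join ['\n'] (parts ++ [['`','`','`']]) = _
    rw [join_append_singleton _ _ _ hne, hjoin]
    simp
  · simp only [hodd, Bool.false_eq_true, if_false]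
    unfold PySem.Str.join
    rw [hmap]
    show String.ofList (PySem.Chars.join ['\n'] parts) = content
    rw [hjoin, String.ofList_toList]
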